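-- pv_equiv track=rewrite | github.com/gKim1GW/project2 | ParetoOptimal.py | pareto_scan
-- ===== SOURCE A (Python) =====
-- def pareto_scan(sorted_array):
--     result = []
--     max_y = 0
--
--     i = len(sorted_array) - 1
--
--     # If the current y is greater than or equal to the maximum so far, add it to the result
--     while i >= 0:
--         x = sorted_array[i][0]
--         y = sorted_array[i][1]
--
--         if y >= max_y:
--             result.append((x, y))
--             max_y = y
--
--         i -= 1
--
--     result.reverse()  # reverse the list to make x in ascending order
--     return result
-- ===== SOURCE B (Python) =====
-- def pareto_scan(sorted_array):
--     # Suffix-maximum pass (seeded at 0, strictly-later elements), then a forward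
--     # filter keeping points whose y reaches that suffix max; output is already ascending.
--     sm = []
--     run = 0
--     for _, y in reversed(sorted_array):
--         sm.append(run)
--         run = max(run, y)
--     sm.reverse()
--     return [(x, y) for (x, y), m in zip(sorted_array, sm) if y >= m]
-- ===== Notes on version B (the rewrite author's own statement) =====
-- stated objective: alternative
-- what changed: Replaces the backward conditional scan with a mutable running max plus final reverse by a suffix-maximum precomputation and a forward filter that emits the result directly in ascending order.
import Mathlib
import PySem

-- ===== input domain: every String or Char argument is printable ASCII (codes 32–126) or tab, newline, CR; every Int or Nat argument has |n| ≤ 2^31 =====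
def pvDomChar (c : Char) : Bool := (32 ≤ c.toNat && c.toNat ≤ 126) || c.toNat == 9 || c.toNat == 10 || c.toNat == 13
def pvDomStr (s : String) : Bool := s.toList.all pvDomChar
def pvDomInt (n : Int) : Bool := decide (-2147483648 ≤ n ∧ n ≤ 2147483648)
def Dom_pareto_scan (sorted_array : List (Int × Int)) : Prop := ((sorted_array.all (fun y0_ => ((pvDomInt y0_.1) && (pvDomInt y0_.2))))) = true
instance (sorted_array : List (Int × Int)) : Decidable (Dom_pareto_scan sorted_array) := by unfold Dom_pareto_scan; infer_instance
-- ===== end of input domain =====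

-- B replaces the backward scan + final reverse with a suffix-max precomputation and a
-- forward filter emitting the result in ascending order directly (alternative decomposition).

-- ===== PORT A =====
-- while-loop over i = len-1 .. 0; counter k = i+1
def paretoLoopA (arr : List (Int × Int)) : Nat → List (Int × Int) → Int → List (Int × Int)
  | 0, res, _ => res
  | Nat.succ k, res, maxy =>
    match PySem.List.pyGet? arr (Int.ofNat k) with
    | some p =>
      if p.2 ≥ maxy then paretoLoopA arr k (res ++ [(p.1, p.2)]) p.2
      else paretoLoopA arr k res maxy
    | none => res  -- unreachable: k is always in range

def pareto_scan (sorted_array : List (Int × Int)) : List (Int × Int) :=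
  (paretoLoopA sorted_array sorted_array.length [] 0).reverse

-- ===== PORT B =====
-- sm pass: foldr carries (running max seeded 0, suffix-max list)
def paretoSuffix (l : List (Int × Int)) : Int × List Int :=
  l.foldr (fun p acc => (max acc.1 p.2, acc.1 :: acc.2)) (0, [])

def pareto_scan_alt (sorted_array : List (Int × Int)) : List (Int × Int) :=
  (sorted_array.zip (paretoSuffix sorted_array).2).filterMap
    (fun q => if q.1.2 ≥ q.2 then some q.1 else none)

-- ===== PRECONDITION & SPEC =====
def Spec_pareto_scan (sorted_array : List (Int × Int)) (out : List (Int × Int)) : Prop := out = pareto_scan_alt sorted_array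
instance (sorted_array : List (Int × Int)) (out : List (Int × Int)) : Decidable (Spec_pareto_scan sorted_array out) := by unfold Spec_pareto_scan; infer_instance

-- ===== CLAIM (what is proved, stated in full; the proofs are below) =====
def Claim_equal_pareto_scan : Prop := ∀ (sorted_array : List (Int × Int)), Dom_pareto_scan sorted_array → Spec_pareto_scan sorted_array (pareto_scan sorted_array)

-- ===== LEMMAS AND PROOFS =====

-- A's backward loop, abstracted as a recursion on the reversed prefix
def fr : List (Int × Int) → Int → List (Int × Int)
  | [], _ => []
  | p :: t, m => if p.2 ≥ m then p :: fr t p.2 else fr t m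

lemma paretoLoopA_eq (arr : List (Int × Int)) :
    ∀ (k : Nat), k ≤ arr.length → ∀ (res : List (Int × Int)) (m : Int),
      paretoLoopA arr k res m = res ++ fr ((arr.take k).reverse) m := by
  intro k
  induction k with
  | zero => intro _ res m; simp [paretoLoopA, fr]
  | succ k ih =>
    intro hk res m
    have hk' : k < arr.length := hk
    have hget : PySem.List.pyGet? arr (Int.ofNat k) = some arr[k] := by
      simp [PySem.List.pyGet?, PySem.List.pyIdx?, hk']
    have htake : (arr.take (k+1)).reverse = arr[k] :: (arr.take k).reverse := by
      rw [List.take_add_one]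
      simp [hk']
    rw [paretoLoopA, hget, htake]
    by_cases h : (arr[k]).2 ≥ m
    · simp [fr, h, ih (Nat.le_of_lt hk')]
    · simp [fr, h, ih (Nat.le_of_lt hk')]
lemma fr_append (a b : List (Int × Int)) (m : Int) :
    fr (a ++ b) m = fr a m ++ fr b (a.foldl (fun acc p => max acc p.2) m) := by
  induction a generalizing m with
  | nil => simp [fr]
  | cons p t ih =>
    by_cases h : p.2 ≥ m
    · have hm : max m p.2 = p.2 := by omega
      simp [fr, h, ih]
    · have hm : max m p.2 = m := by omega
      simp [fr, h, ih, hm]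

lemma paretoSuffix_fst (l : List (Int × Int)) :
    (paretoSuffix l).1 = l.foldr (fun p acc => max acc p.2) 0 := by
  induction l with
  | nil => rfl
  | cons p t ih => simp [paretoSuffix, List.foldr] at *; omega

lemma main_eq (l : List (Int × Int)) :
    (fr l.reverse 0).reverse = pareto_scan_alt l := by
  induction l with
  | nil => rfl
  | cons p t ih =>
    have hsnd : (paretoSuffix (p :: t)).2 = (paretoSuffix t).1 :: (paretoSuffix t).2 := rfl
    have hmax : (t.reverse).foldl (fun acc q => max acc q.2) 0 = (paretoSuffix t).1 := by
      rw [List.foldl_reverse, paretoSuffix_fst]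
    rw [List.reverse_cons, fr_append, hmax]
    unfold pareto_scan_alt
    rw [hsnd]
    by_cases h : p.2 ≥ (paretoSuffix t).1
    · simp [fr, h, ih, pareto_scan_alt]
    · simp [fr, h, ih, pareto_scan_alt]

-- ===== VERDICT (by name: the statement is the Claim_ definition above) =====
theorem pareto_scan_spec : Claim_equal_pareto_scan := by
  intro l _
  unfold Spec_pareto_scan pareto_scan
  rw [paretoLoopA_eq l l.length (le_refl _) [] 0]
  simp only [List.take_length, List.nil_append]
  exact main_eq l
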